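-- pv_equiv track=rewrite | github.com/capseal/capseal | BEF-main/bef_zk/capsule/cli/mws.py | _build_diff_summary
-- ===== SOURCE A (Python) =====
-- def _build_diff_summary(changed_files: list[str], diff_text: str) -> str:
--     """Build a machine-readable diff summary."""
--     lines_added = diff_text.count("\n+") - diff_text.count("\n+++")
--     lines_removed = diff_text.count("\n-") - diff_text.count("\n---")
--
--     summary = f"Files changed: {len(changed_files)}\n"
--     summary += f"Lines added: {lines_added}\n"
--     summary += f"Lines removed: {lines_removed}\n"
--     summary += f"\nChanged files:\n"
--     for f in changed_files[:20]:
--         summary += f"  - {f}\n"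
--     if len(changed_files) > 20:
--         summary += f"  ... and {len(changed_files) - 20} more\n"
--
--     return summary
-- ===== SOURCE B (Python) =====
-- def _build_diff_summary(changed_files: list[str], diff_text: str) -> str:
--     """Build a machine-readable diff summary (single-pass line scan)."""
--     lines_added = 0
--     lines_removed = 0
--     for line in diff_text.split("\n")[1:]:
--         if line.startswith("+") and not line.startswith("+++"):
--             lines_added += 1
--         elif line.startswith("-") and not line.startswith("---"):
--             lines_removed += 1
--     out = [
--         f"Files changed: {len(changed_files)}",
--         f"Lines added: {lines_added}",
--         f"Lines removed: {lines_removed}",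
--         "",
--         "Changed files:",
--     ]
--     out.extend(f"  - {f}" for f in changed_files[:20])
--     if len(changed_files) > 20:
--         out.append(f"  ... and {len(changed_files) - 20} more")
--     return "\n".join(out) + "\n"
-- ===== Notes on version B (the rewrite author's own statement) =====
-- stated objective: alternative
-- what changed: Replaces the four substring .count() scans with a single pass over diff_text.split("\n")[1:] classifying each line by startswith, and builds the summary by joining a list of lines instead of repeated string concatenation.
import Mathlib
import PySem

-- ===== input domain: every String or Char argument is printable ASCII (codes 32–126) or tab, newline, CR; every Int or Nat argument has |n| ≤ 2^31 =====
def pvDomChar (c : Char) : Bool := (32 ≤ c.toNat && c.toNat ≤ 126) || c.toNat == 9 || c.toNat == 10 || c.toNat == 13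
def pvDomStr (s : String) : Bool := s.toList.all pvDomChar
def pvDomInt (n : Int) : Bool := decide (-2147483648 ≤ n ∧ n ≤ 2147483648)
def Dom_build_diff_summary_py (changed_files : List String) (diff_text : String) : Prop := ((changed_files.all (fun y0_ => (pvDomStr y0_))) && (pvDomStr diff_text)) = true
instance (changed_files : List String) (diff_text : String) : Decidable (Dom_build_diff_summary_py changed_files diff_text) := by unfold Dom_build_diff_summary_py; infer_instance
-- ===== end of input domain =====

-- B replaces the four substring .count() scans by one pass over the "\n"-split lines and builds the
-- summary with a join instead of repeated concatenation (alternative decomposition, same result).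


-- ===== PORT A =====
-- Port of A: counts via Python str.count of "\n+", "\n+++", "\n-", "\n---",
-- summary built by successive concatenation (strings handled as List Char, String.ofList at the end).
def build_diff_summary_py (changed_files : List String) (diff_text : String) : String :=
  let lines_added : Int := (PySem.Str.count diff_text "\n+" : Int) - (PySem.Str.count diff_text "\n+++" : Int)
  let lines_removed : Int := (PySem.Str.count diff_text "\n-" : Int) - (PySem.Str.count diff_text "\n---" : Int)
  let summary : List Char := "Files changed: ".toList ++ PySem.Int.toChars (changed_files.length : Int) ++ ['\n']
  let summary := summary ++ "Lines added: ".toList ++ PySem.Int.toChars lines_added ++ ['\n']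
  let summary := summary ++ "Lines removed: ".toList ++ PySem.Int.toChars lines_removed ++ ['\n']
  let summary := summary ++ "\nChanged files:\n".toList
  let summary := (PySem.List.slice changed_files none (some 20)).foldl
      (fun acc f => acc ++ "  - ".toList ++ f.toList ++ ['\n']) summary
  let summary := if changed_files.length > 20 then
      summary ++ "  ... and ".toList ++ PySem.Int.toChars ((changed_files.length : Int) - 20) ++ " more\n".toList
    else summary
  String.ofList summary

-- ===== PORT B =====
-- Port of B: one pass over diff_text.split("\n")[1:] classifying lines, summary via "\n".join.
def build_diff_summary_py_alt (changed_files : List String) (diff_text : String) : String :=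
  let parts := PySem.Chars.splitOn diff_text.toList ['\n']
  let counts : Int × Int := (PySem.List.slice parts (some 1) none).foldl
      (fun (p : Int × Int) line =>
        if PySem.Chars.startswith line ['+'] && !PySem.Chars.startswith line ['+', '+', '+'] then
          (p.1 + 1, p.2)
        else if PySem.Chars.startswith line ['-'] && !PySem.Chars.startswith line ['-', '-', '-'] then
          (p.1, p.2 + 1)
        else p) (0, 0)
  let out : List (List Char) :=
    ["Files changed: ".toList ++ PySem.Int.toChars (changed_files.length : Int),
     "Lines added: ".toList ++ PySem.Int.toChars counts.1,
     "Lines removed: ".toList ++ PySem.Int.toChars counts.2,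
     [],
     "Changed files:".toList]
    ++ (PySem.List.slice changed_files none (some 20)).map (fun f => "  - ".toList ++ f.toList)
    ++ (if (changed_files.length : Int) > 20 then
          ["  ... and ".toList ++ PySem.Int.toChars ((changed_files.length : Int) - 20) ++ " more".toList]
        else [])
  String.ofList (PySem.Chars.join ['\n'] out ++ ['\n'])

-- ===== PRECONDITION & SPEC =====
def Spec_build_diff_summary_py (changed_files : List String) (diff_text : String) (out : String) : Prop := out = build_diff_summary_py_alt changed_files diff_text
instance (changed_files : List String) (diff_text : String) (out : String) : Decidable (Spec_build_diff_summary_py changed_files diff_text out) := by unfold Spec_build_diff_summary_py; infer_instance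

-- ===== CLAIM (what is proved, stated in full; the proofs are below) =====
def Claim_equal_build_diff_summary_py : Prop := ∀ (changed_files : List String) (diff_text : String), Dom_build_diff_summary_py changed_files diff_text → Spec_build_diff_summary_py changed_files diff_text (build_diff_summary_py changed_files diff_text)

-- ===== LEMMAS AND PROOFS =====

def pvOcc (p : List Char) : List Char → Nat
  | [] => 0
  | c :: rest =>
      if c = '\n' ∧ p <+: rest then pvOcc p (List.drop p.length rest) + 1 else pvOcc p rest
  termination_by l => l.length
  decreasing_by
    · simp
    · simp

theorem pv_prefix_cons (p : List Char) (c : Char) (rest : List Char) :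
    ('\n' :: p).isPrefixOf (c :: rest) = true ↔ (c = '\n' ∧ p <+: rest) := by
  rw [List.isPrefixOf_iff_prefix, List.cons_prefix_cons]
  tauto

theorem pv_count_go_eq (p : List Char) :
    ∀ (fuel : Nat) (l : List Char) (acc : Nat), l.length ≤ fuel →
      PySem.Chars.count.go ('\n' :: p) fuel l acc = acc + pvOcc p l := by
  intro fuel
  induction fuel with
  | zero =>
      intro l acc h
      have : l = [] := by cases l <;> simp_all
      subst this
      simp [PySem.Chars.count.go, pvOcc]
  | succ f ih =>
      intro l acc h
      cases l with
      | nil => simp [PySem.Chars.count.go, pvOcc]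
      | cons c rest =>
          rw [PySem.Chars.count.go, pvOcc]
          simp only [List.length_cons, List.drop_succ_cons] at h ⊢
          by_cases hcond : c = '\n' ∧ p <+: rest
          · rw [if_pos ((pv_prefix_cons p c rest).2 hcond), if_pos hcond]
            rw [ih]
            · omega
            · simp [List.length_drop]; omega
          · rw [if_neg (fun hx => hcond ((pv_prefix_cons p c rest).1 hx)), if_neg hcond]
            exact ih rest acc (by omega)

theorem pv_count_eq (s p : List Char) :
    PySem.Chars.count s ('\n' :: p) = pvOcc p s := by
  rw [PySem.Chars.count]
  simp only [List.isEmpty_cons, Bool.false_eq_true, if_false]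
  rw [pv_count_go_eq p s.length s 0 (le_refl _)]
  omega


def pvSplitNl : List Char → List (List Char)
  | [] => [[]]
  | c :: rest =>
      if c = '\n' then [] :: pvSplitNl rest
      else
        match pvSplitNl rest with
        | [] => [[c]]
        | h :: t => (c :: h) :: t

theorem pvSplitNl_ne_nil (l : List Char) : pvSplitNl l ≠ [] := by
  cases l with
  | nil => simp [pvSplitNl]
  | cons c rest =>
      simp only [pvSplitNl]
      split
      · simp
      · split <;> simp

theorem pv_split_go_eq :
    ∀ (fuel : Nat) (l cur : List Char) (acc : List (List Char)), l.length ≤ fuel →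
      PySem.Chars.splitOn.go ['\n'] fuel l cur acc =
        acc.reverse ++ (match pvSplitNl l with
                        | [] => [cur.reverse]
                        | h :: t => (cur.reverse ++ h) :: t) := by
  intro fuel
  induction fuel with
  | zero =>
      intro l cur acc h
      have : l = [] := by cases l <;> simp_all
      subst this
      simp [PySem.Chars.splitOn.go, pvSplitNl]
  | succ f ih =>
      intro l cur acc h
      cases l with
      | nil => simp [PySem.Chars.splitOn.go, pvSplitNl]
      | cons c rest =>
          rw [PySem.Chars.splitOn.go]
          simp only [List.length_cons, List.drop_succ_cons] at h ⊢
          by_cases hc : c = '\n'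
          · subst hc
            rw [if_pos (by simp)]
            rw [ih _ _ _ (by simp; omega)]
            simp only [pvSplitNl, if_pos]
            cases hs : pvSplitNl rest with
            | nil => exact absurd hs (pvSplitNl_ne_nil rest)
            | cons h t => simp [hs]
          · rw [if_neg (by simp [List.isPrefixOf_iff_prefix, List.cons_prefix_cons, Ne.symm hc])]
            rw [ih _ _ _ (by omega)]
            simp only [pvSplitNl, if_neg hc]
            cases hs : pvSplitNl rest with
            | nil => exact absurd hs (pvSplitNl_ne_nil rest)
            | cons h t => simp

theorem pv_splitOn_eq (l : List Char) : PySem.Chars.splitOn l ['\n'] = pvSplitNl l := by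
  rw [PySem.Chars.splitOn]
  rw [pv_split_go_eq (l.length + 1) l [] [] (by omega)]
  cases hs : pvSplitNl l with
  | nil => exact absurd hs (pvSplitNl_ne_nil l)
  | cons h t => simp

theorem pv_head_prefix (p : List Char) (hp : '\n' ∉ p) (l : List Char) :
    ∃ h t, pvSplitNl l = h :: t ∧ (p <+: h ↔ p <+: l) := by
  induction l generalizing p with
  | nil => exact ⟨[], [], rfl, Iff.rfl⟩
  | cons c rest ih =>
      by_cases hc : c = '\n'
      · subst hc
        refine ⟨[], pvSplitNl rest, by simp [pvSplitNl], ?_⟩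
        cases p with
        | nil => simp
        | cons d q =>
            have hd : d ≠ '\n' := by intro h; exact hp (h ▸ List.mem_cons_self)
            constructor
            · intro h; exact absurd (List.eq_nil_of_prefix_nil h) (by simp)
            · intro h
              rw [List.cons_prefix_cons] at h
              exact absurd h.1 hd
      · cases p with
        | nil =>
            obtain ⟨h, t, hst, _⟩ := ih (p := []) (by simp)
            exact ⟨c :: h, t, by simp [pvSplitNl, hc, hst], by simp⟩
        | cons d q =>
            have hq : '\n' ∉ q := fun hmem => hp (List.mem_cons_of_mem d hmem)
            obtain ⟨h, t, hst, hiff⟩ := ih (p := q) hq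
            refine ⟨c :: h, t, by simp [pvSplitNl, hc, hst], ?_⟩
            rw [List.cons_prefix_cons, List.cons_prefix_cons]
            exact and_congr_right fun _ => hiff

theorem pv_tail_cons (c : Char) (rest : List Char) (hc : c ≠ '\n') :
    (pvSplitNl (c :: rest)).tail = (pvSplitNl rest).tail := by
  simp only [pvSplitNl, if_neg hc]
  cases hs : pvSplitNl rest with
  | nil => exact absurd hs (pvSplitNl_ne_nil rest)
  | cons h t => simp

theorem pv_tail_append (q : List Char) (hq : '\n' ∉ q) (r : List Char) :
    (pvSplitNl (q ++ r)).tail = (pvSplitNl r).tail := by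
  induction q with
  | nil => rfl
  | cons c qq ih =>
      have hc : c ≠ '\n' := fun h => hq (h ▸ List.mem_cons_self)
      rw [List.cons_append, pv_tail_cons c _ hc, ih (fun h => hq (List.mem_cons_of_mem c h))]

theorem pv_occ_eq_countP (p : List Char) (hp : '\n' ∉ p) :
    ∀ (l : List Char), pvOcc p l = List.countP (fun s => decide (p <+: s)) (pvSplitNl l).tail := by
  intro l
  induction l using pvOcc.induct (p := p) with
  | case1 => simp [pvOcc, pvSplitNl]
  | case2 c rest hcond ih =>
      rw [pvOcc, if_pos hcond]
      obtain ⟨hc, hpre⟩ := hcond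
      subst hc
      have htail : (pvSplitNl ('\n' :: rest)).tail = pvSplitNl rest := by simp [pvSplitNl]
      rw [htail]
      obtain ⟨h, t, hst, hiff⟩ := pv_head_prefix p hp rest
      rw [hst, List.countP_cons_of_pos (by simpa using hiff.2 hpre)]
      obtain ⟨r, hr⟩ := hpre
      have hdrop : List.drop p.length rest = r := by rw [← hr]; simp
      rw [hdrop] at ih ⊢
      rw [ih]
      have : (pvSplitNl r).tail = t := by
        have h2 := pv_tail_append p hp r
        rw [hr, hst] at h2
        simpa using h2.symm
      rw [this]
  | case3 c rest hcond ih =>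
      rw [pvOcc, if_neg hcond]
      by_cases hc : c = '\n'
      · subst hc
        have htail : (pvSplitNl ('\n' :: rest)).tail = pvSplitNl rest := by simp [pvSplitNl]
        rw [htail]
        obtain ⟨h, t, hst, hiff⟩ := pv_head_prefix p hp rest
        have hpre : ¬ p <+: rest := fun hx => hcond ⟨rfl, hx⟩
        rw [hst, List.countP_cons_of_neg (by simpa using fun hx => hpre (hiff.1 hx))]
        rw [ih, hst]
        simp
      · rw [pv_tail_cons c rest hc]
        exact ih

theorem pv_countP_sub (p3 p1 : List Char → Bool) (himp : ∀ x, p3 x = true → p1 x = true)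
    (l : List (List Char)) :
    List.countP p1 l = List.countP (fun x => p1 x && !p3 x) l + List.countP p3 l := by
  induction l with
  | nil => simp
  | cons x xs ih =>
      simp only [List.countP_cons]
      by_cases h3 : p3 x = true
      · simp [h3, himp x h3, ih]; omega
      · simp only [Bool.not_eq_true] at h3
        by_cases h1 : p1 x = true <;> (simp [h1, h3, ih]; try omega)

theorem pv_join_newline (L : List (List Char)) (hL : L ≠ []) :
    PySem.Chars.join ['\n'] L ++ ['\n'] = (L.map (fun s => s ++ ['\n'])).flatten := by
  induction L with
  | nil => exact absurd rfl hL
  | cons x xs ih =>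
      cases xs with
      | nil => simp [PySem.Chars.join_singleton]
      | cons y t =>
          rw [PySem.Chars.join_cons_cons]
          simp only [List.map_cons, List.flatten_cons] at ih ⊢
          rw [List.append_assoc, List.append_assoc, ih (by simp)]
          simp

theorem pv_plus_minus (x : List Char) :
    ¬ (['+'] <+: x ∧ ['-'] <+: x) := by
  rintro ⟨h1, h2⟩
  cases x with
  | nil => exact absurd (List.eq_nil_of_prefix_nil h1) (by simp)
  | cons c t =>
      rw [List.cons_prefix_cons] at h1 h2
      rw [← h1.1] at h2
      exact absurd h2.1 (by decide)

theorem pv_fold_counts (ls : List (List Char)) (a b : Int) :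
    ls.foldl (fun (p : Int × Int) line =>
        if PySem.Chars.startswith line ['+'] && !PySem.Chars.startswith line ['+', '+', '+'] then
          (p.1 + 1, p.2)
        else if PySem.Chars.startswith line ['-'] && !PySem.Chars.startswith line ['-', '-', '-'] then
          (p.1, p.2 + 1)
        else p) (a, b) =
      (a + List.countP (fun s => PySem.Chars.startswith s ['+'] && !PySem.Chars.startswith s ['+', '+', '+']) ls,
       b + List.countP (fun s => PySem.Chars.startswith s ['-'] && !PySem.Chars.startswith s ['-', '-', '-']) ls) := by
  induction ls generalizing a b with
  | nil => simp
  | cons x xs ih =>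
      simp only [List.foldl_cons, List.countP_cons]
      by_cases hA : (PySem.Chars.startswith x ['+'] && !PySem.Chars.startswith x ['+', '+', '+']) = true
      · have hR : (PySem.Chars.startswith x ['-'] && !PySem.Chars.startswith x ['-', '-', '-']) = false := by
          rw [Bool.and_eq_true] at hA
          have h1 := (PySem.Chars.startswith_iff x ['+']).1 hA.1
          cases hmb : PySem.Chars.startswith x ['-'] with
          | false => simp
          | true => exact absurd ⟨h1, (PySem.Chars.startswith_iff x ['-']).1 hmb⟩ (pv_plus_minus x)
        rw [if_pos hA, ih]
        simp [hA, hR]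
        omega
      · rw [if_neg hA]
        simp only [Bool.not_eq_true] at hA
        by_cases hR : (PySem.Chars.startswith x ['-'] && !PySem.Chars.startswith x ['-', '-', '-']) = true
        · rw [if_pos hR, ih]
          simp [hA, hR]
          omega
        · rw [if_neg hR, ih]
          simp only [Bool.not_eq_true] at hR
          simp [hA, hR]


theorem pv_pred_eq (p : List Char) :
    (fun s => decide (p <+: s)) = (fun s => PySem.Chars.startswith s p) := by
  funext s
  simp only [PySem.Chars.startswith]
  cases h : List.isPrefixOf p s with
  | true => simpa using List.isPrefixOf_iff_prefix.1 h
  | false =>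
      simp only [decide_eq_false_iff_not]
      intro hx
      rw [← List.isPrefixOf_iff_prefix] at hx
      simp [h] at hx

theorem pv_count_tail (p : List Char) (hp : '\n' ∉ p) (s : List Char) :
    PySem.Chars.count s ('\n' :: p) =
      List.countP (fun x => PySem.Chars.startswith x p) (pvSplitNl s).tail := by
  rw [pv_count_eq, pv_occ_eq_countP p hp, pv_pred_eq]

theorem pv_sub_count (c : Char) (hc : c ≠ '\n') (s : List Char) :
    (PySem.Chars.count s ['\n', c] : Int) - (PySem.Chars.count s ['\n', c, c, c] : Int) =
      List.countP (fun x => PySem.Chars.startswith x [c] && !PySem.Chars.startswith x [c, c, c])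
        (pvSplitNl s).tail := by
  have h1 := pv_count_tail [c] (by simp [Ne.symm hc]) s
  have h3 := pv_count_tail [c, c, c] (by simp [Ne.symm hc]) s
  have himp : ∀ x, PySem.Chars.startswith x [c, c, c] = true → PySem.Chars.startswith x [c] = true := by
    intro x hx
    rw [PySem.Chars.startswith_iff] at hx ⊢
    exact List.IsPrefix.trans ⟨[c, c], rfl⟩ hx
  have hsub := pv_countP_sub (fun x => PySem.Chars.startswith x [c, c, c])
    (fun x => PySem.Chars.startswith x [c]) himp (pvSplitNl s).tail
  show ((PySem.Chars.count s ('\n' :: [c]) : Int)) - ((PySem.Chars.count s ('\n' :: [c, c, c]) : Int)) = _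
  rw [h1, h3, hsub]
  push_cast
  ring

-- ===== VERDICT (by name: the statement is the Claim_ definition above) =====
theorem build_diff_summary_py_spec : Claim_equal_build_diff_summary_py := by
  intro changed_files diff_text _
  unfold Spec_build_diff_summary_py
  unfold build_diff_summary_py build_diff_summary_py_alt
  dsimp only
  apply congrArg
  rw [pv_splitOn_eq, PySem.List.slice_from _ (by norm_num)]
  simp only [Int.toNat_one, List.drop_one, pv_fold_counts, zero_add]
  rw [pv_join_newline _ (by simp)]
  have hplus := pv_sub_count '+' (by decide) diff_text.toList
  have hminus := pv_sub_count '-' (by decide) diff_text.toList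
  simp only [PySem.Str.count] at *
  rw [show ("\n+" : String).toList = ['\n', '+'] from rfl,
      show ("\n+++" : String).toList = ['\n', '+', '+', '+'] from rfl,
      show ("\n-" : String).toList = ['\n', '-'] from rfl,
      show ("\n---" : String).toList = ['\n', '-', '-', '-'] from rfl,
      hplus, hminus]
  simp only [List.append_assoc]
  rw [show (fun (acc : List Char) f => acc ++ ("  - ".toList ++ (String.toList f ++ ['\n'])))
        = (fun acc f => acc ++ ("  - ".toList ++ String.toList f ++ ['\n'])) from by
      funext acc f; simp]
  rw [PySem.List.foldl_append_eq_flatMap (fun f => "  - ".toList ++ String.toList f ++ ['\n'])]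
  by_cases hlen : changed_files.length > 20
  · have hlen' : ((changed_files.length : Int) > 20) := by exact_mod_cast hlen
    simp [hlen, hlen', List.flatten_append, List.map_map, List.flatMap_def,
      List.append_assoc, Function.comp_def]
  · have hlen' : ¬ ((changed_files.length : Int) > 20) := by exact_mod_cast hlen
    simp [hlen, hlen', List.map_map, List.flatMap_def, List.append_assoc, Function.comp_def]
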